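-- pv_equiv track=rewrite | github.com/mcao516/Missing_information | BART_analysis/utils_google_evaluation.py | process_document
-- ===== SOURCE A (Python) =====
-- def process_document(raw_doc):
--     TRIVIAL_SENTS = [
--         'Share this with',
--         'Copy this link',
--         'These are external links and will open in a new window',
--     ]
--
--     raw_doc = raw_doc.strip()
--     raw_doc_sents = raw_doc.split('\n')
--
--     start_signal = False
--     filtered_sentences = []
--     for s in raw_doc_sents:
--         if start_signal:
--             filtered_sentences.append(s)
--         elif len(s.split()) > 1 and s not in TRIVIAL_SENTS:
--             start_signal = True
--             filtered_sentences.append(s)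
--
--     return ' '.join(filtered_sentences)
-- ===== SOURCE B (Python) =====
-- def process_document(raw_doc):
--     TRIVIAL_SENTS = {
--         'Share this with',
--         'Copy this link',
--         'These are external links and will open in a new window',
--     }
--     sents = raw_doc.strip().split('\n')
--     start = next((i for i, s in enumerate(sents)
--                   if len(s.split()) > 1 and s not in TRIVIAL_SENTS), len(sents))
--     return ' '.join(sents[start:])
-- ===== Notes on version B (the rewrite author's own statement) =====
-- stated objective: simpler
-- what changed: Replaces the stateful start_signal flag and per-line append loop with a find-first-qualifying-index (next over enumerate) followed by taking the list suffix and joining it.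
import Mathlib
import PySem

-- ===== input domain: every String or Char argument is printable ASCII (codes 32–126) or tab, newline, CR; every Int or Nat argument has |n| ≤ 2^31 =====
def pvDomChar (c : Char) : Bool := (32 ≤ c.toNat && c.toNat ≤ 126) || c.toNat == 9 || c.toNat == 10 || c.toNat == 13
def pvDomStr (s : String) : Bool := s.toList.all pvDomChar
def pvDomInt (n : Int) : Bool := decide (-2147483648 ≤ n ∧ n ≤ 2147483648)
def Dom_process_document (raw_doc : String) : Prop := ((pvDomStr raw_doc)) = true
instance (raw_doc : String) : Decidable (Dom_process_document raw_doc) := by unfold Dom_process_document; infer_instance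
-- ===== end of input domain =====

-- B replaces A's stateful start_signal flag + append loop with find-first-index then take-suffix (simpler decomposition).

-- ===== PORT A =====
def pvTrivialSents : List String :=
  ["Share this with",
   "Copy this link",
   "These are external links and will open in a new window"]

def process_document (raw_doc : String) : String :=
  let doc := PySem.Str.strip raw_doc
  let raw_doc_sents := (PySem.Str.split? doc "\n").getD []  -- split("\n"): sep nonempty, split? returns some
  let st := raw_doc_sents.foldl
    (fun (st : Bool × List String) s =>
      if st.1 then (true, st.2 ++ [s])
      else if (PySem.Str.split₀ s).length > 1 && !(pvTrivialSents.contains s) then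
        (true, st.2 ++ [s])
      else st)
    (false, [])
  PySem.Str.join " " st.2

-- ===== PORT B =====
-- B keeps TRIVIAL_SENTS as a set: PySem.Set of the same three (distinct) strings.
def pvTrivialSet : PySem.Set String := PySem.Set.ofList pvTrivialSents

def process_document_alt (raw_doc : String) : String :=
  let sents := (PySem.Str.split? (PySem.Str.strip raw_doc) "\n").getD []
  -- next((i for i,s in enumerate(sents) if …), len(sents)) : first qualifying index, default length
  let start := sents.findIdx
    (fun s => (PySem.Str.split₀ s).length > 1 && !(pvTrivialSet.contains s))
  -- sents[start:] with 0 ≤ start ≤ len(sents)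
  PySem.Str.join " " (PySem.List.slice sents (some (start : Int)) none)

-- ===== PRECONDITION & SPEC =====
def Spec_process_document (raw_doc : String) (out : String) : Prop := out = process_document_alt raw_doc
instance (raw_doc : String) (out : String) : Decidable (Spec_process_document raw_doc out) := by unfold Spec_process_document; infer_instance

-- ===== CLAIM (what is proved, stated in full; the proofs are below) =====
def Claim_equal_process_document : Prop := ∀ (raw_doc : String), Dom_process_document raw_doc → Spec_process_document raw_doc (process_document raw_doc)

-- ===== LEMMAS AND PROOFS =====

-- ===== VERDICT (by name: the statement is the Claim_ definition above) =====
lemma pv_isIn_eq (s : String) :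
    pvTrivialSet.contains s = pvTrivialSents.contains s := by
  simp [PySem.Set.contains, pvTrivialSet, PySem.Set.mem_ofList]

lemma pv_loop_true (p : String → Bool) (l acc : List String) :
    (l.foldl (fun (st : Bool × List String) s =>
        if st.1 then (true, st.2 ++ [s])
        else if p s then (true, st.2 ++ [s]) else st) (true, acc)).2 = acc ++ l := by
  induction l generalizing acc with
  | nil => simp
  | cons a l ih => simp [ih]

lemma pv_loop_false (p : String → Bool) (l : List String) :
    (l.foldl (fun (st : Bool × List String) s =>
        if st.1 then (true, st.2 ++ [s])
        else if p s then (true, st.2 ++ [s]) else st) (false, [])).2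
      = l.drop (l.findIdx p) := by
  induction l with
  | nil => simp
  | cons a l ih =>
    by_cases h : p a
    · simp [h, pv_loop_true, List.findIdx_cons]
    · simp [h, ih, List.findIdx_cons]

lemma pv_slice_drop (l : List String) (k : Nat) :
    PySem.List.slice l (some (k : Int)) none = l.drop k := by
  simp [PySem.List.slice_from_natCast]

theorem process_document_spec : Claim_equal_process_document := by
  intro raw_doc _
  unfold Spec_process_document process_document process_document_alt
  simp only [pv_isIn_eq, pv_slice_drop]
  rw [pv_loop_false]
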